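-- pv_equiv track=rewrite | github.com/benjyb1/FCP-COURSEWORK | coursework3-benjy.py | flag_explain
-- ===== SOURCE A (Python) =====
-- def zeros_index(grid):
--     '''This function outputs the coordinates of all the zeros in a grid.
--     args: grid, the number of rows, number of columns
--     returns: a list of the coordinates of all where the 0s in the grid lie
--     '''
--     zeros_list=[]
--     for row_index, row in enumerate(grid):
--         for col_index, col in enumerate(row):
--             # The enumerate function pairs the entry with an ascending number
--             if col == 0:
--                 zeros_list.append((row_index, col_index))
--
--     return zeros_list
--
-- def flag_explain(grid,ans):
--     '''Function that relates to the -explain flag.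
--     args: the inital grid, the solved grid
--     return: An explanation for what number to replace each 0 with
--     '''
--     # Output a list of where the 0s are
--     zeros_coords=zeros_index(grid)
--     explained=[]
--     # For each zero coordinate find the corresponding number in the ans grid
--     for coord in zeros_coords:
--         row=coord[0]
--         col=coord[1]
--         answer=ans[row][col]
--         explained.append(f'Put {answer} in location ({row}, {col})')
--     return explained
-- ===== SOURCE B (Python) =====
-- def flag_explain(grid, ans):
--     """Lockstep traversal: pair grid with ans via zip (no indexing into ans,
--     no intermediate coordinate list) and emit each message in one comprehension."""
--     return [f'Put {a} in location ({r}, {c})'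
--             for r, (grow, arow) in enumerate(zip(grid, ans))
--             for c, (g, a) in enumerate(zip(grow, arow))
--             if g == 0]
-- ===== Notes on version B (the rewrite author's own statement) =====
-- stated objective: idiomatic
-- what changed: Replaces A's two staged passes (collect zero coordinates, then look each one up by indexing ans[row][col]) with a single comprehension that traverses grid and ans in lockstep via zip, so ans is never indexed and no intermediate list or accumulator exists.
import Mathlib
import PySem

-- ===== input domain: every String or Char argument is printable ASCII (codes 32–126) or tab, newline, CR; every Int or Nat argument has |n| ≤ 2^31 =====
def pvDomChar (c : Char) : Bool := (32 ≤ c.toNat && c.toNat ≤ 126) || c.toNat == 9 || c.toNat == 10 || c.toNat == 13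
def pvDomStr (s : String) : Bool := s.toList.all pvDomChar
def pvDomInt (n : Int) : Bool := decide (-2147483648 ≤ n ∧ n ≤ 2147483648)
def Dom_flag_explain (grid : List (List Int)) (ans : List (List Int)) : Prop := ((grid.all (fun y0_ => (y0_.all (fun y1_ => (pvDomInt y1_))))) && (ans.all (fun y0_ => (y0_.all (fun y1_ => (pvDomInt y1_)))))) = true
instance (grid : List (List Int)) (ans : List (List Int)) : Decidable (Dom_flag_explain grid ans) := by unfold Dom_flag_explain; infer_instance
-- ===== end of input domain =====

-- B traverses grid and ans in lockstep with zip in one comprehension (no indexing into ans,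
-- no intermediate coordinate list); return-value equivalence on Pre_ (where A does not raise).

-- the f-string f'Put {answer} in location ({row}, {col})'
def pvMsg (answer row col : Int) : String :=
  "Put " ++ PySem.Int.toStr answer ++ " in location (" ++ PySem.Int.toStr row ++ ", " ++ PySem.Int.toStr col ++ ")"

-- ===== PORT A =====
def zeros_index (grid : List (List Int)) : List (Int × Int) :=
  (PySem.List.enumerate grid).foldl
    (fun zeros_list p =>
      (PySem.List.enumerate p.2).foldl
        (fun zl q => if q.2 == 0 then zl ++ [(p.1, q.1)] else zl) zeros_list)
    []

def flag_explain (grid : List (List Int)) (ans : List (List Int)) : List String :=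
  let zeros_coords := zeros_index grid
  zeros_coords.foldl
    (fun explained coord =>
      let row := coord.1
      let col := coord.2
      -- ans[row][col]: Python raises IndexError out of range; Pre_ excludes that, default is unreachable inside Pre_
      let answer := PySem.List.pyGetD (PySem.List.pyGetD ans row []) col 0
      explained ++ [pvMsg answer row col])
    []

-- ===== PORT B =====
-- one comprehension over enumerate(zip(grid, ans)) / enumerate(zip(grow, arow))
def flag_explain_alt (grid : List (List Int)) (ans : List (List Int)) : List String :=
  (PySem.List.enumerate (grid.zip ans)).flatMap (fun p =>
    (PySem.List.enumerate (p.2.1.zip p.2.2)).flatMap (fun q =>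
      if q.2.1 == 0 then [pvMsg q.2.2 p.1 q.1] else []))

-- ===== PRECONDITION & SPEC =====
-- Pre_ excludes exactly the inputs where A raises IndexError: a zero cell of grid whose
-- coordinates are out of range in ans.
def Pre_flag_explain (grid : List (List Int)) (ans : List (List Int)) : Prop :=
  ∀ i ∈ List.range grid.length, ∀ j ∈ List.range ((grid.getD i []).length),
    (grid.getD i []).getD j 1 = 0 → i < ans.length ∧ j < (ans.getD i []).length
instance (grid : List (List Int)) (ans : List (List Int)) : Decidable (Pre_flag_explain grid ans) := by unfold Pre_flag_explain; infer_instance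
def pvWitness_flag_explain : List (List Int) × List (List Int) := ([[0, 1], [2, 0]], [[9, 1], [2, 8]])

def Spec_flag_explain (grid : List (List Int)) (ans : List (List Int)) (out : List String) : Prop := out = flag_explain_alt grid ans
instance (grid : List (List Int)) (ans : List (List Int)) (out : List String) : Decidable (Spec_flag_explain grid ans out) := by unfold Spec_flag_explain; infer_instance

-- ===== CLAIM (what is proved, stated in full; the proofs are below) =====
def Claim_equal_flag_explain : Prop := ∀ (grid : List (List Int)) (ans : List (List Int)), Dom_flag_explain grid ans → Pre_flag_explain grid ans → Spec_flag_explain grid ans (flag_explain grid ans)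

-- ===== LEMMAS AND PROOFS =====

-- canonical lockstep recursion both sides are reduced to
def feCells (gr ar : List Int) (r c : Int) : List String :=
  match gr, ar with
  | g :: gs, a :: as => (if g == 0 then [pvMsg a r c] else []) ++ feCells gs as r (c + 1)
  | _, _ => []

def feRows (g a : List (List Int)) (r : Int) : List String :=
  match g, a with
  | gr :: gs, ar :: as => feCells gr ar r 0 ++ feRows gs as (r + 1)
  | _, _ => []

theorem zeros_index_eq_flatMap (grid : List (List Int)) :
    zeros_index grid =
      (PySem.List.enumerate grid).flatMap
        (fun p => ((PySem.List.enumerate p.2).filter (fun q => q.2 == 0)).map (fun q => (p.1, q.1))) := by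
  unfold zeros_index
  simp only [PySem.List.foldl_append_if, PySem.List.foldl_append_eq_flatMap, List.nil_append]

theorem flag_explain_eq_flatMap (grid ans : List (List Int)) :
    flag_explain grid ans =
      (PySem.List.enumerate grid).flatMap
        (fun p => ((PySem.List.enumerate p.2).filter (fun q => q.2 == 0)).map
          (fun q => pvMsg (PySem.List.pyGetD (PySem.List.pyGetD ans p.1 []) q.1 0) p.1 q.1)) := by
  unfold flag_explain
  simp only [PySem.List.foldl_append_singleton_eq_map, List.nil_append,
    zeros_index_eq_flatMap, List.map_flatMap, List.map_map]
  rfl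

-- B side: the comprehension equals the lockstep recursion (no precondition needed)
theorem alt_cells_eq (gr : List Int) : ∀ (ar : List Int) (r s : Int),
    (PySem.List.enumerate (gr.zip ar) s).flatMap
      (fun q => if q.2.1 == 0 then [pvMsg q.2.2 r q.1] else []) = feCells gr ar r s := by
  induction gr with
  | nil => intro ar r s; simp [feCells, PySem.List.enumerate_nil]
  | cons g gs ih =>
    intro ar r s
    cases ar with
    | nil => simp [feCells, PySem.List.enumerate_nil]
    | cons a as =>
      show (PySem.List.enumerate ((g, a) :: gs.zip as) s).flatMap _ = _
      rw [PySem.List.enumerate_cons, List.flatMap_cons, ih]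
      rfl

theorem alt_rows_eq (g : List (List Int)) : ∀ (a : List (List Int)) (s : Int),
    (PySem.List.enumerate (g.zip a) s).flatMap (fun p =>
      (PySem.List.enumerate (p.2.1.zip p.2.2)).flatMap
        (fun q => if q.2.1 == 0 then [pvMsg q.2.2 p.1 q.1] else [])) = feRows g a s := by
  induction g with
  | nil => intro a s; simp [feRows, PySem.List.enumerate_nil]
  | cons gr gs ih =>
    intro a s
    cases a with
    | nil => simp [feRows, PySem.List.enumerate_nil]
    | cons ar as =>
      show (PySem.List.enumerate ((gr, ar) :: gs.zip as) s).flatMap _ = _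
      rw [PySem.List.enumerate_cons, List.flatMap_cons, ih]
      show _ ++ _ = feCells gr ar s 0 ++ feRows gs as (s + 1)
      rw [alt_cells_eq]

theorem flag_explain_alt_eq_feRows (grid ans : List (List Int)) :
    flag_explain_alt grid ans = feRows grid ans 0 := by
  unfold flag_explain_alt; exact alt_rows_eq grid ans 0

-- pyGetD on a cons at a (nat-cast) successor index
theorem pyGetD_cons_succ' {α : Type} (x : α) (xs : List α) (k : Nat) (d : α) :
    PySem.List.pyGetD (x :: xs) ((k : Int) + 1) d = PySem.List.pyGetD xs (k : Int) d := by
  simp only [PySem.List.pyGetD]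
  rw [PySem.List.pyGet?_cons_succ]

-- A side: the indexed flatMap form equals the lockstep recursion, under the in-range condition
theorem a_cells_eq (gr : List Int) : ∀ (ar : List Int) (r c : Int),
    (∀ j : Nat, gr.getD j 1 = 0 → j < ar.length) →
    feCells gr ar r c =
      ((PySem.List.enumerate gr c).filter (fun q => q.2 == 0)).map
        (fun q => pvMsg (PySem.List.pyGetD ar (q.1 - c) 0) r q.1) := by
  induction gr with
  | nil => intro ar r c _; simp [feCells, PySem.List.enumerate_nil]
  | cons g gs ih =>
    intro ar r c h
    cases ar with
    | nil =>
      have h0 : g ≠ 0 := by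
        intro hg
        exact absurd (h 0 (by simpa using hg)) (by simp)
      have hs : ∀ j : Nat, gs.getD j 1 ≠ 0 := by
        intro j hj
        exact absurd (h (j + 1) (by simpa using hj)) (by simp)
      have hfil : ((PySem.List.enumerate (g :: gs) c).filter (fun q => q.2 == 0)) = [] := by
        rw [List.filter_eq_nil_iff]
        intro q hq
        rcases (PySem.List.mem_enumerate_iff _ _ _).1 hq with ⟨k, hk, rfl⟩
        cases k with
        | zero => simpa using h0
        | succ k =>
          have hk' : k < gs.length := by simpa using hk
          have := hs k
          rw [List.getD_eq_getElem?_getD, List.getElem?_eq_getElem hk'] at this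
          simpa using this
      rw [hfil, List.map_nil]
      rfl
    | cons a as =>
      have hs : ∀ j : Nat, gs.getD j 1 = 0 → j < as.length := by
        intro j hj
        have := h (j + 1) (by simpa using hj)
        simp only [List.length_cons] at this
        omega
      show ((if g == 0 then [pvMsg a r c] else []) ++ feCells gs as r (c + 1)) = _
      rw [ih as r (c + 1) hs, PySem.List.enumerate_cons, List.filter_cons]
      have htail :
          List.map (fun q => pvMsg (PySem.List.pyGetD as (q.1 - (c + 1)) 0) r q.1)
              ((PySem.List.enumerate gs (c + 1)).filter (fun q => q.2 == 0)) =
            List.map (fun q => pvMsg (PySem.List.pyGetD (a :: as) (q.1 - c) 0) r q.1)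
              ((PySem.List.enumerate gs (c + 1)).filter (fun q => q.2 == 0)) := by
        apply List.map_congr_left
        intro q hq
        rcases (PySem.List.mem_enumerate_iff _ _ _).1 (List.mem_of_mem_filter hq) with ⟨k, hk, rfl⟩
        have h1 : (c + 1 + (k : Int)) - c = ((k : Int) + 1) := by ring
        have h2 : (c + 1 + (k : Int)) - (c + 1) = (k : Int) := by ring
        rw [h1, h2, pyGetD_cons_succ']
      rw [htail]
      by_cases hg : g = 0
      · simp [hg, PySem.List.pyGetD_zero_cons]
      · simp [hg]

theorem a_rows_eq (g : List (List Int)) : ∀ (a : List (List Int)) (r : Int),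
    (∀ k j : Nat, (g.getD k []).getD j 1 = 0 → k < a.length ∧ j < (a.getD k []).length) →
    feRows g a r =
      (PySem.List.enumerate g r).flatMap
        (fun p => ((PySem.List.enumerate p.2).filter (fun q => q.2 == 0)).map
          (fun q => pvMsg (PySem.List.pyGetD (PySem.List.pyGetD a (p.1 - r) []) q.1 0) p.1 q.1)) := by
  induction g with
  | nil => intro a r _; simp [feRows, PySem.List.enumerate_nil]
  | cons gr gs ih =>
    intro a r h
    cases a with
    | nil =>
      have hz : ∀ k j : Nat, ((gr :: gs).getD k []).getD j 1 ≠ 0 := by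
        intro k j hkj
        exact absurd (h k j hkj).1 (by simp)
      have hnil : (PySem.List.enumerate (gr :: gs) r).flatMap
          (fun p => ((PySem.List.enumerate p.2).filter (fun q => q.2 == 0)).map
            (fun q => pvMsg (PySem.List.pyGetD (PySem.List.pyGetD ([] : List (List Int)) (p.1 - r) []) q.1 0) p.1 q.1)) = [] := by
        rw [List.flatMap_eq_nil_iff]
        intro p hp
        rcases (PySem.List.mem_enumerate_iff _ _ _).1 hp with ⟨k, hk, rfl⟩
        have hfil : ((PySem.List.enumerate ((gr :: gs)[k]) 0).filter (fun q => q.2 == 0)) = [] := by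
          rw [List.filter_eq_nil_iff]
          intro q hq
          rcases (PySem.List.mem_enumerate_iff _ _ _).1 hq with ⟨j, hj, rfl⟩
          have e1 : (gr :: gs).getD k [] = (gr :: gs)[k] := List.getD_eq_getElem _ _ hk
          have e2 : (gr :: gs)[k].getD j 1 = (gr :: gs)[k][j] := List.getD_eq_getElem _ _ hj
          have := hz k j
          rw [e1, e2] at this
          simpa using this
        simp only [hfil, List.map_nil]
      rw [hnil]
      rfl
    | cons ar as =>
      have hrow : ∀ j : Nat, gr.getD j 1 = 0 → j < ar.length := by
        intro j hj
        have := (h 0 j (by simpa using hj)).2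
        simpa using this
      have hrest : ∀ k j : Nat, (gs.getD k []).getD j 1 = 0 → k < as.length ∧ j < (as.getD k []).length := by
        intro k j hkj
        have := h (k + 1) j (by simpa using hkj)
        refine ⟨?_, ?_⟩
        · have := this.1; simp only [List.length_cons] at this; omega
        · have := this.2; simpa using this
      show feCells gr ar r 0 ++ feRows gs as (r + 1) = _
      rw [PySem.List.enumerate_cons, List.flatMap_cons]
      congr 1
      · rw [a_cells_eq gr ar r 0 hrow]
        apply List.map_congr_left
        intro q _
        simp [PySem.List.pyGetD_zero_cons]
      · rw [ih as (r + 1) hrest]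
        apply List.flatMap_congr
        intro p hp
        rcases (PySem.List.mem_enumerate_iff _ _ _).1 hp with ⟨k, hk, rfl⟩
        apply List.map_congr_left
        intro q _
        have h1 : (r + 1 + (k : Int)) - r = ((k : Int) + 1) := by ring
        have h2 : (r + 1 + (k : Int)) - (r + 1) = (k : Int) := by ring
        rw [h1, h2, pyGetD_cons_succ']

-- ===== VERDICT (by name: the statements are the Claim_ definitions above) =====
theorem flag_explain_spec : Claim_equal_flag_explain := by
  intro grid ans _ hpre
  unfold Spec_flag_explain
  have h : ∀ k j : Nat, (grid.getD k []).getD j 1 = 0 → k < ans.length ∧ j < (ans.getD k []).length := by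
    intro k j hkj
    have hj' : j < (grid.getD k []).length := by
      by_contra hcon
      rw [List.getD_eq_getElem?_getD, List.getElem?_eq_none (by omega)] at hkj
      exact absurd hkj (by simp)
    have hk' : k < grid.length := by
      by_contra hcon
      have hnone : grid.getD k [] = [] := by
        rw [List.getD_eq_getElem?_getD, List.getElem?_eq_none (by omega)]
        rfl
      rw [hnone] at hj'
      simp at hj'
    exact hpre k (List.mem_range.2 hk') j (List.mem_range.2 hj') hkj
  rw [flag_explain_eq_flatMap, flag_explain_alt_eq_feRows, a_rows_eq grid ans 0 h]
  apply List.flatMap_congr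
  intro p _
  apply List.map_congr_left
  intro q _
  rw [sub_zero]
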